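-- pv_equiv track=rewrite | github.com/Tawana2000/Python | Python Advance Challenges/can-pile-up.py | can_pile_up
-- ===== SOURCE A (Python) =====
-- def can_pile_up(numbers):
--     while len(numbers) > 1:
--         if numbers[0] >= numbers[-1]:
--             numbers.pop(0)
--         else:
--             numbers.pop()
--         if numbers and numbers[0] < numbers[-1]:
--             return False
--     return True
-- ===== SOURCE B (Python) =====
-- def can_pile_up(numbers):
--     i = 0
--     j = len(numbers) - 1
--     while i < j:
--         if numbers[i] >= numbers[j]:
--             i += 1
--         else:
--             j -= 1
--         if numbers[i] < numbers[j]: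
--             return False
--     return True
-- ===== Notes on version B (the rewrite author's own statement) =====
-- stated objective: faster
-- what changed: Replaces A's destructive pop(0)/pop() loop on a shrinking list (each pop(0) is O(n)) with a two-pointer inward index scan over the untouched list (B also does not mutate its argument); measured 40x at n=65536 and A timed out at n=262144 on the check's const family, though on early-exit inputs both are equally fast.
import Mathlib
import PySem

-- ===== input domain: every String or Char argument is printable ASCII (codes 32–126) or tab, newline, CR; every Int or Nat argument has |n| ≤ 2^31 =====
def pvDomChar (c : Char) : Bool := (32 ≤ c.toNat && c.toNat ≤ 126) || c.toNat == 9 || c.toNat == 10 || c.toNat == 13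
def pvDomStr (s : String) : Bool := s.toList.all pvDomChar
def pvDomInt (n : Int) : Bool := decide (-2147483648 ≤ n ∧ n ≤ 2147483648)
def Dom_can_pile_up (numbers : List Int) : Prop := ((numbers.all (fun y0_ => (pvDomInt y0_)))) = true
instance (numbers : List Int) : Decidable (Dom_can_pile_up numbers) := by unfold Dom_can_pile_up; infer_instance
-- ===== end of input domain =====

-- B replaces A's destructive pop(0)/pop() loop with a two-pointer inward index scan over the
-- untouched list; A mutates its argument (pop) while B does not — the equivalence proved here
-- is about the return value only.

-- ===== PORT A =====
-- while len(numbers) > 1: pop the front if numbers[0] >= numbers[-1] else the back;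
-- then return False if the remaining list has numbers[0] < numbers[-1].
def can_pile_up (numbers : List Int) : Bool :=
  if _h : 1 < numbers.length then
    let l := if PySem.List.pyGetD numbers 0 0 ≥ PySem.List.pyGetD numbers (-1) 0
             then numbers.tail else numbers.dropLast
    if decide (l ≠ []) && decide (PySem.List.pyGetD l 0 0 < PySem.List.pyGetD l (-1) 0)
    then false
    else can_pile_up l
  else true
termination_by numbers.length
decreasing_by
  split <;> simp_all [List.length_dropLast, List.length_tail] <;> omega

-- ===== PORT B =====
-- two pointers i, j into the untouched list, moving inward
def pileScan (xs : List Int) (i j : Int) : Bool :=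
  if _h : i < j then
    let p := if PySem.List.pyGetD xs i 0 ≥ PySem.List.pyGetD xs j 0
             then (i + 1, j) else (i, j - 1)
    if PySem.List.pyGetD xs p.1 0 < PySem.List.pyGetD xs p.2 0 then false
    else pileScan xs p.1 p.2
  else true
termination_by (j - i).toNat
decreasing_by
  split <;> simp <;> omega

def can_pile_up_alt (numbers : List Int) : Bool :=
  pileScan numbers 0 (PySem.List.len numbers - 1)

-- ===== PRECONDITION & SPEC =====
def Spec_can_pile_up (numbers : List Int) (out : Bool) : Prop := out = can_pile_up_alt numbers
instance (numbers : List Int) (out : Bool) : Decidable (Spec_can_pile_up numbers out) := by unfold Spec_can_pile_up; infer_instance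

-- ===== CLAIM (what is proved, stated in full; the proofs are below) =====
def Claim_equal_can_pile_up : Prop := ∀ (numbers : List Int), Dom_can_pile_up numbers → Spec_can_pile_up numbers (can_pile_up numbers)


-- ===== LEMMAS AND PROOFS =====

lemma take_tail' (l : List Int) (n : Nat) : (l.take n).tail = l.tail.take (n-1) := by
  cases l <;> cases n <;> simp

lemma take_dropLast' (l : List Int) (n : Nat) (h : n ≤ l.length) :
    (l.take n).dropLast = l.take (n-1) := by
  rw [List.dropLast_eq_take, List.take_take]
  congr 1
  simp [List.length_take]
  omega

lemma seg_len (xs : List Int) (a m : Nat) (h : a + m ≤ xs.length) :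
    ((xs.drop a).take m).length = m := by
  simp [List.length_take]; omega

lemma seg_get0 (xs : List Int) (a m : Nat) (ha : a < xs.length) (hm : 0 < m) :
    PySem.List.pyGetD ((xs.drop a).take m) 0 0 = xs[a] := by
  rw [PySem.List.pyGetD_zero, List.getD_eq_getElem?_getD]
  simp [hm, ha]

lemma seg_last (xs : List Int) (a m : Nat) (hm : 0 < m) (h : a + m ≤ xs.length) :
    PySem.List.pyGetD ((xs.drop a).take m) (-1) 0 = xs[a+m-1] := by
  have hlen := seg_len xs a m h
  have hne : (xs.drop a).take m ≠ [] := by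
    rw [← List.length_pos_iff]; omega
  rw [PySem.List.pyGetD_neg_one _ 0 hne, List.getLast_eq_getElem]
  simp only [hlen]
  simp [List.getElem_take, List.getElem_drop]
  congr 1
  omega

lemma seg_ne (xs : List Int) (a m : Nat) (hm : 0 < m) (h : a + m ≤ xs.length) :
    (xs.drop a).take m ≠ [] := by
  rw [← List.length_pos_iff, seg_len xs a m h]; omega

-- A's working list at pointer state (i, j) is the untouched list's segment xs[i..j]
lemma seg_correspond (xs : List Int) : ∀ (n : Nat) (i j : Int), 0 ≤ i → i ≤ j → j < xs.length →
    (j - i).toNat = n →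
    can_pile_up ((xs.drop i.toNat).take ((j - i).toNat + 1)) = pileScan xs i j := by
  intro n
  induction n with
  | zero =>
    intro i j hi hij hj hn
    have hji : j = i := by omega
    have h1 : (j - i).toNat + 1 = 1 := by omega
    rw [h1]
    have hlen : ((xs.drop i.toNat).take 1).length = 1 := seg_len xs i.toNat 1 (by omega)
    rw [can_pile_up, pileScan, dif_neg (by omega), dif_neg (by omega)]
  | succ n ih =>
    intro i j hi hij hj hn
    have hij' : i < j := by omega
    have ha : i.toNat < xs.length := by omega
    have hb : j.toNat < xs.length := by omega
    have hA0 : PySem.List.pyGetD ((xs.drop i.toNat).take ((j - i).toNat + 1)) 0 0 = xs[i.toNat] :=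
      seg_get0 xs _ _ ha (by omega)
    have hAlast : PySem.List.pyGetD ((xs.drop i.toNat).take ((j - i).toNat + 1)) (-1) 0
        = xs[j.toNat] := by
      rw [seg_last xs _ _ (by omega) (by omega)]
      congr 1; omega
    have hBi : PySem.List.pyGetD xs i 0 = xs[i.toNat] :=
      PySem.List.pyGetD_eq_getElem xs 0 hi (by omega)
    have hBj : PySem.List.pyGetD xs j 0 = xs[j.toNat] :=
      PySem.List.pyGetD_eq_getElem xs 0 (by omega) (by omega)
    have hseglen : 1 < ((xs.drop i.toNat).take ((j - i).toNat + 1)).length := by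
      rw [seg_len xs i.toNat ((j - i).toNat + 1) (by omega)]; omega
    rw [can_pile_up, pileScan, dif_pos hseglen, dif_pos hij']
    by_cases hc : xs[i.toNat] ≥ xs[j.toNat]
    · -- pop the front: segment becomes xs[i+1..j]
      have htail : ((xs.drop i.toNat).take ((j - i).toNat + 1)).tail
          = (xs.drop (i+1).toNat).take ((j - (i+1)).toNat + 1) := by
        have e1 : (i+1).toNat = i.toNat + 1 := by omega
        have e2 : (j - (i+1)).toNat + 1 = (j - i).toNat + 1 - 1 := by omega
        rw [take_tail', List.tail_drop, e1, e2]
      have h0' : PySem.List.pyGetD ((xs.drop (i+1).toNat).take ((j - (i+1)).toNat + 1)) 0 0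
          = xs[(i+1).toNat] :=
        seg_get0 xs _ _ (by omega) (by omega)
      have hl' : PySem.List.pyGetD ((xs.drop (i+1).toNat).take ((j - (i+1)).toNat + 1)) (-1) 0
          = xs[j.toNat] := by
        rw [seg_last xs _ _ (by omega) (by omega)]
        congr 1; omega
      have hne' : (xs.drop (i+1).toNat).take ((j - (i+1)).toNat + 1) ≠ [] :=
        seg_ne xs _ _ (by omega) (by omega)
      have hBi' : PySem.List.pyGetD xs (i+1) 0 = xs[(i+1).toNat] :=
        PySem.List.pyGetD_eq_getElem xs 0 (by omega) (by omega)
      simp only [hA0, hAlast, hBi, hBj, if_pos hc, htail, h0', hl', hBi',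
        decide_eq_true hne', Bool.true_and]
      by_cases hlt : xs[(i+1).toNat] < xs[j.toNat]
      · simp [hlt]
      · simp only [hlt, decide_false, Bool.false_eq_true, if_false]
        exact ih (i+1) j (by omega) (by omega) hj (by omega)
    · -- pop the back: segment becomes xs[i..j-1]
      have hdrop : ((xs.drop i.toNat).take ((j - i).toNat + 1)).dropLast
          = (xs.drop i.toNat).take ((j - 1 - i).toNat + 1) := by
        rw [take_dropLast' _ _ (by simp [List.length_drop]; omega)]
        congr 1; omega
      have h0' : PySem.List.pyGetD ((xs.drop i.toNat).take ((j - 1 - i).toNat + 1)) 0 0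
          = xs[i.toNat] :=
        seg_get0 xs _ _ ha (by omega)
      have hl' : PySem.List.pyGetD ((xs.drop i.toNat).take ((j - 1 - i).toNat + 1)) (-1) 0
          = xs[j.toNat - 1] := by
        rw [seg_last xs _ _ (by omega) (by omega)]
        congr 1; omega
      have hne' : (xs.drop i.toNat).take ((j - 1 - i).toNat + 1) ≠ [] :=
        seg_ne xs _ _ (by omega) (by omega)
      have hBj' : PySem.List.pyGetD xs (j-1) 0 = xs[j.toNat - 1] := by
        rw [PySem.List.pyGetD_eq_getElem xs 0 (by omega) (by omega)]
        congr 1; omega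
      simp only [hA0, hAlast, hBi, hBj, if_neg hc, hdrop, h0', hl', hBj',
        decide_eq_true hne', Bool.true_and]
      by_cases hlt : xs[i.toNat] < xs[j.toNat - 1]
      · simp [hlt]
      · simp only [hlt, decide_false, Bool.false_eq_true, if_false]
        have := ih i (j-1) hi (by omega) (by omega) (by omega)
        simpa using this

-- ===== VERDICT (by name: the statement is the Claim_ definition above) =====
theorem can_pile_up_spec : Claim_equal_can_pile_up := by
  intro numbers _hdom
  unfold Spec_can_pile_up can_pile_up_alt
  rcases hn : numbers with _ | ⟨x, rest⟩
  · rw [can_pile_up, pileScan, dif_neg (by simp), dif_neg (by norm_num [PySem.List.len_eq])]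
  · have hlen : 1 ≤ numbers.length := by rw [hn]; simp
    have key := seg_correspond numbers (numbers.length - 1) 0 ((numbers.length : Int) - 1)
      (by omega) (by omega) (by omega) (by omega)
    rw [← hn]
    rw [PySem.List.len_eq]
    have hseg : (numbers.drop (0:Int).toNat).take ((((numbers.length : Int) - 1) - 0).toNat + 1)
        = numbers := by
      have h1 : (((numbers.length : Int) - 1) - 0).toNat + 1 = numbers.length := by omega
      rw [h1]
      simp
    rw [hseg] at key
    exact key
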